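-- pv_equiv track=rewrite | github.com/Rubindai/USYD | Year1/sem1/INFO1112/A2_NXDOMAIN/verifier.py | is_valid_master
-- ===== SOURCE A (Python) =====
-- def is_valid_port(port):
--     try:
--         port = int(port)
--
--     except:
--
--         port = -1
--
--     if port < 1024 or port > 65535:
--         port = -1
--     return port
--
-- def valid_section_a_b(section_a):
--     valid_char1 = (
--         'abcdefghijklmnopqrstuvwxyzABCDEFGHIJKLMNOPQRSTUVWXYZ0123456789-')
--     for i in section_a:
--
--         if i not in valid_char1:
--             return False
--     return True
--
-- def valid_section_c(section_c):
--     if section_c[0] == '.' or section_c[-1] == '.':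
--         return False
--     valid_char2 = (
--         'abcdefghijklmnopqrstuvwxyzABCDEFGHIJKLMNOPQRSTUVWXYZ0123456789-.')
--     for i in section_c:
--
--         if i not in valid_char2:
--             return False
--     return True
--
-- def is_valid_hostname_master(host):
--     host = host.split('.')
--     if len(host) >= 3:
--
--         section_a = host[-1]
--         section_b = host[-2]
--         section_c_list = host[:-2]
--         section_c = ''
--         for i in section_c_list:
--             section_c += i+'.'
--         section_c = section_c[:-1]
--         if section_a == '' or section_b == '' or section_c == '':
--             return False
--
--         value_a = valid_section_a_b(section_a)
--         value_b = valid_section_a_b(section_b)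
--         value_c = valid_section_c(section_c)
--         value = value_a and value_b and value_c
--         return value
--     else:
--         return False
--
-- def is_valid_master(master_content):
--     i = 0
--     if len(master_content) < 2:
--         return False
--     while i < len(master_content):
--         if i == 0:
--             sever_port = master_content[i].strip()
--             port_check = is_valid_port(sever_port)
--             if port_check == -1:
--                 return False
--         if i != 0:
--             content = master_content[i].strip().split(',')
--             if len(content) != 2:
--                 return False
--
--             host = content[0]
--             h_valid = is_valid_hostname_master(host)
--             port = content[1]
--             port_check = is_valid_port(port)
--             if port_check == -1:
--                 return False
--             if h_valid == False:
--                 return False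
--             j = 1
--             while j < len(master_content):
--                 content2 = master_content[j].strip().split(',')
--                 content2_host = content2[0]
--                 try:
--                     content2_port = content2[1]
--                 except IndexError:
--                     return False
--
--                 if host == content2_host and content2_port != port:
--                     return False
--                 j += 1
--         i += 1
--     return True
-- ===== SOURCE B (Python) =====
-- def is_valid_port(port):
--     try:
--         port = int(port)
--     except:
--         port = -1
--     if port < 1024 or port > 65535:
--         port = -1
--     return port
--
-- def valid_section_a_b(section_a):
--     valid_char1 = (
--         'abcdefghijklmnopqrstuvwxyzABCDEFGHIJKLMNOPQRSTUVWXYZ0123456789-')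
--     for i in section_a:
--         if i not in valid_char1:
--             return False
--     return True
--
-- def valid_section_c(section_c):
--     if section_c[0] == '.' or section_c[-1] == '.':
--         return False
--     valid_char2 = (
--         'abcdefghijklmnopqrstuvwxyzABCDEFGHIJKLMNOPQRSTUVWXYZ0123456789-.')
--     for i in section_c:
--         if i not in valid_char2:
--             return False
--     return True
--
-- def is_valid_hostname_master(host):
--     host = host.split('.')
--     if len(host) >= 3:
--         section_a = host[-1]
--         section_b = host[-2]
--         section_c_list = host[:-2]
--         section_c = ''
--         for i in section_c_list:
--             section_c += i+'.'
--         section_c = section_c[:-1]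
--         if section_a == '' or section_b == '' or section_c == '':
--             return False
--         value_a = valid_section_a_b(section_a)
--         value_b = valid_section_a_b(section_b)
--         value_c = valid_section_c(section_c)
--         return value_a and value_b and value_c
--     else:
--         return False
--
-- def is_valid_master(master_content):
--     # One validation pass collecting (host, port) pairs, then a dict-based
--     # duplicate-host check instead of a per-line rescan of all lines.
--     if len(master_content) < 2:
--         return False
--     if is_valid_port(master_content[0].strip()) == -1:
--         return False
--     pairs = []
--     for line in master_content[1:]:
--         fields = line.strip().split(',')
--         if len(fields) != 2:
--             return False
--         host, port = fields
--         if is_valid_port(port) == -1 or not is_valid_hostname_master(host):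
--             return False
--         pairs.append((host, port))
--     seen = {}
--     for host, port in pairs:
--         if host in seen and seen[host] != port:
--             return False
--         seen[host] = port
--     return True
-- ===== Notes on version B (the rewrite author's own statement) =====
-- stated objective: alternative
-- what changed: A interleaves validation with a per-line rescan of the whole file to find host/port conflicts; B does one validation pass collecting the raw (host, port) pairs and then detects conflicts with a single dict pass (first-seen port per host).
import Mathlib
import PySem

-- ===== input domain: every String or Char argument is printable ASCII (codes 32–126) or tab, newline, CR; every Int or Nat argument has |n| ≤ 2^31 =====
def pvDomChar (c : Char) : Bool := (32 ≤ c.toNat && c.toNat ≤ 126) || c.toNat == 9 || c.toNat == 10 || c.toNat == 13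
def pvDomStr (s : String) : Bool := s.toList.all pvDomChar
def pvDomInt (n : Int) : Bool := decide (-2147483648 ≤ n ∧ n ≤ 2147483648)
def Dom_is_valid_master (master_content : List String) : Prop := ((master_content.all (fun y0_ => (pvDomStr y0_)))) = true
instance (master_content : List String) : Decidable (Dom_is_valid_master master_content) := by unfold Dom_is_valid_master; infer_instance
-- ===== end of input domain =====

-- B replaces A's per-line rescan of the whole file with one validation pass plus a dict-based
-- conflict check (objective: alternative decomposition of the same task).

-- ===== PORT A =====
-- shared helpers (both Pythons contain these helper functions verbatim); strings are
-- handled on the List Char side as PYSEM.md prescribes.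
def pvValid1 : List Char :=
  "abcdefghijklmnopqrstuvwxyzABCDEFGHIJKLMNOPQRSTUVWXYZ0123456789-".toList
def pvValid2 : List Char :=
  "abcdefghijklmnopqrstuvwxyzABCDEFGHIJKLMNOPQRSTUVWXYZ0123456789-.".toList

-- is_valid_port: int(port) with try/except, then the range check
def pvIsValidPort (port : List Char) : Int :=
  let p : Int := match PySem.Int.ofChars? port with | some v => v | none => -1
  if p < 1024 || p > 65535 then -1 else p

-- valid_section_a_b: the char loop with early return is List.all
def pvValidSectionAB (s : List Char) : Bool := s.all (fun c => pvValid1.contains c)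

-- valid_section_c: s[0]/s[-1] raise IndexError on "" in Python; every caller has
-- checked s ≠ '' first, so the pyGetD default is never read.
def pvValidSectionC (s : List Char) : Bool :=
  if PySem.List.pyGetD s 0 ' ' == '.' || PySem.List.pyGetD s (-1) ' ' == '.' then false
  else s.all (fun c => pvValid2.contains c)

def pvIsValidHostname (host : List Char) : Bool :=
  let parts := PySem.Chars.splitOn host ['.']
  if 3 ≤ parts.length then
    let section_a := PySem.List.pyGetD parts (-1) []
    let section_b := PySem.List.pyGetD parts (-2) []
    let section_c_list := PySem.List.slice parts none (some (-2))
    let sc0 := section_c_list.foldl (fun acc i => acc ++ i ++ ['.']) []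
    let section_c := PySem.List.slice sc0 none (some (-1))
    if section_a == [] || section_b == [] || section_c == [] then false
    else pvValidSectionAB section_a && pvValidSectionAB section_b && pvValidSectionC section_c
  else false

-- master_content[i].strip().split(',')
def pvStripSplit (l : String) : List (List Char) :=
  PySem.Chars.splitOn (PySem.Chars.strip l.toList) [',']

-- A's inner while-j loop: content2[0] always exists (split is never empty);
-- content2[1] raises IndexError on a 1-field line, caught → return False.
def pvConflictScan (host port : List Char) : List String → Bool
  | [] => true
  | l :: rest =>
    match pvStripSplit l with
    | h2 :: p2 :: _ =>
      if host == h2 && p2 != port then false else pvConflictScan host port rest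
    | _ => false

-- A's outer while-i loop over the lines after index 0 (allLines stays the full tail)
def pvLoopA (allLines : List String) : List String → Bool
  | [] => true
  | l :: rest =>
    match pvStripSplit l with
    | [host, port] =>
      let h_valid := pvIsValidHostname host
      if pvIsValidPort port == -1 then false
      else if h_valid == false then false
      else if pvConflictScan host port allLines then pvLoopA allLines rest else false
    | _ => false

def is_valid_master (master_content : List String) : Bool :=
  if master_content.length < 2 then false
  else match master_content with
    | [] => false   -- unreachable: length ≥ 2
    | l0 :: rest =>
      if pvIsValidPort (PySem.Chars.strip l0.toList) == -1 then false
      else pvLoopA rest rest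

-- ===== PORT B =====
-- B's validation pass: collect the raw (host, port) pairs, None = early `return False`
def pvCollect : List String → Option (List (List Char × List Char))
  | [] => some []
  | l :: rest =>
    match pvStripSplit l with
    | [host, port] =>
      if pvIsValidPort port == -1 || pvIsValidHostname host == false then none
      else (pvCollect rest).map (fun ps => (host, port) :: ps)
    | _ => none

-- B's dict pass: `if host in seen and seen[host] != port: return False; seen[host] = port`
def pvSeenLoop (seen : PySem.Dict (List Char) (List Char)) :
    List (List Char × List Char) → Bool
  | [] => true
  | (host, port) :: rest =>
    if seen.contains host && seen.getD host port != port then false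
    else pvSeenLoop (seen.insert host port) rest

def is_valid_master_alt (master_content : List String) : Bool :=
  if master_content.length < 2 then false
  else match master_content with
    | [] => false   -- unreachable: length ≥ 2
    | l0 :: rest =>
      if pvIsValidPort (PySem.Chars.strip l0.toList) == -1 then false
      else match pvCollect rest with
        | none => false
        | some pairs => pvSeenLoop PySem.Dict.empty pairs

-- ===== PRECONDITION & SPEC =====
def Spec_is_valid_master (master_content : List String) (out : Bool) : Prop := out = is_valid_master_alt master_content
instance (master_content : List String) (out : Bool) : Decidable (Spec_is_valid_master master_content out) := by unfold Spec_is_valid_master; infer_instance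

-- ===== CLAIM (what is proved, stated in full; the proofs are below) =====
def Claim_equal_is_valid_master : Prop := ∀ (master_content : List String), Dom_is_valid_master master_content → Spec_is_valid_master master_content (is_valid_master master_content)

-- ===== LEMMAS AND PROOFS =====

-- per-line validity (exactly 2 fields, valid host, valid port) and the raw pair of a line
def pvOk (l : String) : Bool :=
  match pvStripSplit l with
  | [h, p] => !(pvIsValidPort p == -1) && pvIsValidHostname h
  | _ => false

def pvPair (l : String) : List Char × List Char :=
  match pvStripSplit l with
  | h :: p :: _ => (h, p)
  | _ => ([], [])

def pvCompat (a b : List Char × List Char) : Prop := a.1 = b.1 → a.2 = b.2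

lemma pvOk_split (l : String) (h : pvOk l = true) :
    pvStripSplit l = [(pvPair l).1, (pvPair l).2] := by
  unfold pvOk pvPair at *
  rcases hs : pvStripSplit l with _ | ⟨h1, _ | ⟨p1, _ | ⟨c, t⟩⟩⟩ <;> simp [hs] at h ⊢

lemma pvConflictScan_eq (host port : List Char) (T : List String) :
    pvConflictScan host port T =
      T.all (fun l => match pvStripSplit l with
        | h2 :: p2 :: _ => !(host == h2 && p2 != port)
        | _ => false) := by
  induction T with
  | nil => rfl
  | cons l rest ih =>
    simp only [pvConflictScan, List.all_cons]
    rw [ih]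
    rcases h : pvStripSplit l with _ | ⟨h2, _ | ⟨p2, t⟩⟩
    · simp
    · simp
    · cases hc : (host == h2 && p2 != port)
      · simp [hc]
      · simp [hc]

lemma pvLoopA_eq (T S : List String) :
    pvLoopA T S = S.all (fun l => pvOk l &&
      pvConflictScan (pvPair l).1 (pvPair l).2 T) := by
  induction S with
  | nil => rfl
  | cons l rest ih =>
    simp only [pvLoopA, List.all_cons]
    rw [ih]
    rcases h : pvStripSplit l with _ | ⟨h1, _ | ⟨p1, _ | ⟨c, t⟩⟩⟩ <;>
      simp only [pvOk, pvPair, h]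
    · simp
    · simp
    · cases hp : pvIsValidPort p1 == -1
      · cases hh : pvIsValidHostname h1
        · simp
        · cases hsc : pvConflictScan h1 p1 T <;> simp
      · simp
    · simp

lemma pvCollect_eq (S : List String) :
    pvCollect S = if S.all pvOk then some (S.map pvPair) else none := by
  induction S with
  | nil => rfl
  | cons l rest ih =>
    simp only [pvCollect, List.all_cons, List.map_cons]
    rw [ih]
    rcases h : pvStripSplit l with _ | ⟨h1, _ | ⟨p1, _ | ⟨c, t⟩⟩⟩ <;>
      simp only [pvOk, pvPair, h]
    · simp
    · simp
    · cases hp : pvIsValidPort p1 == -1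
      · cases hh : pvIsValidHostname h1
        · simp
        · cases ha : rest.all pvOk <;> simp
      · simp
    · simp

lemma pvSeenStep (seen : PySem.Dict (List Char) (List Char)) (h p : List Char)
    (rest : List (List Char × List Char))
    (hhead : ∀ v, seen.get? h = some v → v = p) :
    ((∀ a ∈ rest, ∀ v, (seen.insert h p).get? a.1 = some v → v = a.2) ∧
        rest.Pairwise pvCompat)
      ↔ ((∀ a ∈ (h, p) :: rest, ∀ v, seen.get? a.1 = some v → v = a.2) ∧
        ((∀ b ∈ rest, pvCompat (h, p) b) ∧ rest.Pairwise pvCompat)) := by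
  constructor
  · rintro ⟨H, P⟩
    refine ⟨?_, ?_, P⟩
    · rintro a ha v hg
      rcases List.mem_cons.mp ha with rfl | ha
      · exact hhead v hg
      · by_cases he : a.1 = h
        · have := H a ha p (by rw [PySem.Dict.get?_insert, if_pos he])
          rw [← this]
          exact (hhead v (by rwa [← he])).symm ▸ rfl
        · exact H a ha v (by rw [PySem.Dict.get?_insert, if_neg he, hg])
    · intro b hb he
      exact H b hb p (by rw [PySem.Dict.get?_insert, if_pos he.symm])
  · rintro ⟨H, Hc, P⟩
    refine ⟨?_, P⟩
    intro a ha v hg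
    rw [PySem.Dict.get?_insert] at hg
    by_cases he : a.1 = h
    · rw [if_pos he] at hg
      cases hg
      exact Hc a ha he.symm
    · rw [if_neg he] at hg
      exact H a (List.mem_cons_of_mem _ ha) v hg

lemma pvSeenLoop_iff (ps : List (List Char × List Char))
    (seen : PySem.Dict (List Char) (List Char)) :
    pvSeenLoop seen ps = true ↔
      ((∀ a ∈ ps, ∀ v, seen.get? a.1 = some v → v = a.2) ∧ ps.Pairwise pvCompat) := by
  induction ps generalizing seen with
  | nil => simp [pvSeenLoop]
  | cons a rest ih =>
    obtain ⟨h, p⟩ := a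
    rw [List.pairwise_cons]
    by_cases hC : (seen.contains h && seen.getD h p != p) = true
    · rw [Bool.and_eq_true] at hC
      obtain ⟨hc1, hc2⟩ := hC
      rw [PySem.Dict.contains_eq_isSome_get?] at hc1
      obtain ⟨v, hg⟩ := Option.isSome_iff_exists.mp hc1
      have hgetD : seen.getD h p = v := PySem.Dict.getD_of_get?_eq_some seen p hg
      have hvp : v ≠ p := by
        intro hvp; rw [hgetD, hvp, bne_self_eq_false] at hc2; exact Bool.false_ne_true hc2
      have hC' : (seen.contains h && seen.getD h p != p) = true := by
        rw [PySem.Dict.contains_eq_isSome_get?, hc1, hc2]; rfl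
      simp only [pvSeenLoop]
      rw [if_pos hC']
      constructor
      · intro hf; exact absurd hf (by simp)
      · rintro ⟨h1, -, -⟩
        exact absurd (h1 (h, p) List.mem_cons_self v hg) hvp
    · have hhead : ∀ v, seen.get? h = some v → v = p := by
        intro v hg
        rcases Bool.and_eq_false_iff.mp (Bool.not_eq_true _ |>.mp hC) with hc | hc
        · rw [PySem.Dict.contains_eq_isSome_get?, hg] at hc; exact absurd hc (by simp)
        · have := PySem.Dict.getD_of_get?_eq_some seen p hg
          rw [this] at hc
          exact bne_eq_false_iff_eq.mp hc
      calc pvSeenLoop seen ((h, p) :: rest) = true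
          ↔ pvSeenLoop (seen.insert h p) rest = true := by
            simp only [pvSeenLoop]; rw [if_neg hC]
        _ ↔ _ := by rw [ih]; exact pvSeenStep seen h p rest hhead

lemma pvPairwise_iff (ps : List (List Char × List Char)) :
    (∀ a ∈ ps, ∀ b ∈ ps, a.1 = b.1 → b.2 = a.2) ↔ ps.Pairwise pvCompat := by
  induction ps with
  | nil => simp
  | cons x t ih =>
    rw [List.pairwise_cons]
    constructor
    · intro H
      refine ⟨fun b hb he => (H b (List.mem_cons_of_mem _ hb) x List.mem_cons_self he.symm).symm ▸ rfl, ?_⟩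
      exact ih.mp (fun a ha b hb => H a (List.mem_cons_of_mem _ ha) b (List.mem_cons_of_mem _ hb))
    · rintro ⟨hx, hp⟩ a ha b hb he
      rcases List.mem_cons.mp ha with ha | ha <;> rcases List.mem_cons.mp hb with hb | hb
      · rw [ha, hb]
      · rw [ha] at he ⊢
        exact (hx b hb he).symm
      · rw [hb] at he ⊢
        exact hx a ha he.symm
      · exact ih.mpr hp a ha b hb he

lemma pvMain (mc : List String) : is_valid_master mc = is_valid_master_alt mc := by
  unfold is_valid_master is_valid_master_alt
  cases mc with
  | nil => rfl
  | cons l0 rest =>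
    by_cases hlen : (l0 :: rest).length < 2
    · rw [if_pos hlen, if_pos hlen]
    · rw [if_neg hlen, if_neg hlen]
      cases hp0 : pvIsValidPort (PySem.Chars.strip l0.toList) == -1
      · simp only [hp0, Bool.false_eq_true, if_false]
        rw [pvCollect_eq, pvLoopA_eq]
        cases hall : rest.all pvOk
        · show (rest.all fun l => pvOk l && pvConflictScan (pvPair l).1 (pvPair l).2 rest)
            = match (if (false : Bool) = true then some (rest.map pvPair) else none) with
              | none => false
              | some pairs => pvSeenLoop PySem.Dict.empty pairs
          rw [if_neg (by simp)]
          obtain ⟨l, hl, hok⟩ := List.all_eq_false.mp hall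
          show _ = false
          rw [List.all_eq_false]
          refine ⟨l, hl, ?_⟩
          rw [Bool.not_eq_true] at hok ⊢
          rw [Bool.and_eq_false_iff]
          exact Or.inl hok
        · show (rest.all fun l => pvOk l && pvConflictScan (pvPair l).1 (pvPair l).2 rest)
            = match (if (true : Bool) = true then some (rest.map pvPair) else none) with
              | none => false
              | some pairs => pvSeenLoop PySem.Dict.empty pairs
          rw [if_pos rfl]
          show _ = pvSeenLoop PySem.Dict.empty (rest.map pvPair)
          have hallP := List.all_eq_true.mp hall
          rw [Bool.eq_iff_iff, pvSeenLoop_iff, List.all_eq_true]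
          have hforall :
              (∀ l ∈ rest, (pvOk l && pvConflictScan (pvPair l).1 (pvPair l).2 rest) = true)
                ↔ (∀ a ∈ rest.map pvPair, ∀ b ∈ rest.map pvPair, a.1 = b.1 → b.2 = a.2) := by
            constructor
            · intro H a ha b hb he
              obtain ⟨la, hla, rfl⟩ := List.mem_map.mp ha
              obtain ⟨lb, hlb, rfl⟩ := List.mem_map.mp hb
              have hsc := Bool.and_elim_right (H la hla)
              rw [pvConflictScan_eq, List.all_eq_true] at hsc
              have := hsc lb hlb
              rw [pvOk_split lb (hallP lb hlb)] at this
              simp only at this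
              rw [Bool.not_eq_eq_eq_not, Bool.not_true, Bool.and_eq_false_iff] at this
              rcases this with hc | hc
              · exact absurd he (by simpa using hc)
              · simpa using hc
            · intro H l hl
              rw [Bool.and_eq_true_iff]
              refine ⟨hallP l hl, ?_⟩
              rw [pvConflictScan_eq, List.all_eq_true]
              intro l' hl'
              rw [pvOk_split l' (hallP l' hl')]
              simp only
              have := H (pvPair l) (List.mem_map_of_mem hl) (pvPair l') (List.mem_map_of_mem hl')
              by_cases he : (pvPair l).1 = (pvPair l').1
              · simp [he, this he]
              · simp [he]
          rw [hforall, pvPairwise_iff]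
          simp [PySem.Dict.get?_empty]
      · simp [hp0]

-- ===== VERDICT (by name: the statement is the Claim_ definition above) =====
theorem is_valid_master_spec : Claim_equal_is_valid_master := by
  intro mc _
  unfold Spec_is_valid_master
  exact pvMain mc
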